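-- pv_equiv track=rewrite | github.com/ALIZE126/FireRedTTS2 | app/api/backend.py | check_dialogue_text
-- ===== SOURCE A (Python) =====
-- from typing import List, Literal
--
-- def check_monologue_text(text: str, prefix: str = None) -> bool:
--     text = text.strip()
--     # Check speaker tags
--     if prefix is not None and (not text.startswith(prefix)):
--         return False
--     # Remove prefix
--     if prefix is not None:
--         text = text.removeprefix(prefix)
--     text = text.strip()
--     # If empty?
--     if len(text) == 0:
--         return False
--     return True
--
-- def check_dialogue_text(text_list: List[str]) -> bool:
--     if len(text_list) == 0:
--         return False
--     for text in text_list: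
--         if not (
--             check_monologue_text(text, "[S1]")
--             or check_monologue_text(text, "[S2]")
--             or check_monologue_text(text, "[S3]")
--             or check_monologue_text(text, "[S4]")
--         ):
--             return False
--     return True
-- ===== SOURCE B (Python) =====
-- def check_dialogue_text(text_list):
--     if not text_list:
--         return False
--     for line in text_list:
--         n = len(line)
--         i = 0
--         while i < n and line[i].isspace():
--             i += 1
--         # parse the tag character by character: '[' 'S' digit-in-1..4 ']'
--         if i + 4 > n or line[i] != '[' or line[i + 1] != 'S' \
--                 or not ('1' <= line[i + 2] <= '4') or line[i + 3] != ']':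
--             return False
--         # the spoken content: at least one non-whitespace character after the tag
--         if not any(not c.isspace() for c in line[i + 4:]):
--             return False
--     return True
-- ===== Notes on version B (the rewrite author's own statement) =====
-- stated objective: alternative
-- what changed: A strips each line and tries four prefix-stripping helper calls (one per speaker tag); B makes a single left-to-right scan per line: skip leading whitespace by index, parse the tag character by character with a digit-range test ('[' 'S' '1'-'4' ']'), then look for one non-whitespace character after it - no strip, no slicing, no tag list.
import Mathlib
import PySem

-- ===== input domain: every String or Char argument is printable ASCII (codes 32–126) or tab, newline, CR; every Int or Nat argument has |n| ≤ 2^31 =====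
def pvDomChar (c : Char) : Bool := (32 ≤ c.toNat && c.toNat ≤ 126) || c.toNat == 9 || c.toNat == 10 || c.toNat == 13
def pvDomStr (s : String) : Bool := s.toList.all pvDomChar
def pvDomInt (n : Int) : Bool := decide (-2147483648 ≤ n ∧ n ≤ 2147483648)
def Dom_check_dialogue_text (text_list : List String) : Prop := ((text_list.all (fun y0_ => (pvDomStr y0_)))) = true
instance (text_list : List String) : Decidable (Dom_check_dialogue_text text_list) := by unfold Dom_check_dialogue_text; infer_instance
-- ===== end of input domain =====

-- B replaces A's strip / four-way OR of prefix-stripping helper calls by a single left-to-right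
-- scan of each line: skip leading whitespace, parse the tag character by character
-- ('[' 'S' digit-in-1..4 ']'), then look for one non-whitespace character after it (idiomatic; same cost).

-- ===== PORT A =====
-- str.removeprefix has no PySem primitive: ported by hand, exact (drop the prefix iff it is a prefix).
def pyRemoveprefix (t p : List Char) : List Char :=
  if p.isPrefixOf t then t.drop p.length else t

def check_monologue_text (text : String) (pfx : Option String) : Bool :=
  let t := PySem.Chars.strip text.toList
  if pfx.isSome && !(PySem.Chars.startswith t (pfx.getD "").toList) then false
  else
    let t := if pfx.isSome then pyRemoveprefix t (pfx.getD "").toList else t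
    let t := PySem.Chars.strip t
    if t.length = 0 then false else true

def check_dialogue_text (text_list : List String) : Bool :=
  if text_list.length = 0 then false
  else
    -- the early-returning for-loop is the conjunction over the list
    text_list.all (fun text =>
      check_monologue_text text (some "[S1]")
      || check_monologue_text text (some "[S2]")
      || check_monologue_text text (some "[S3]")
      || check_monologue_text text (some "[S4]"))

-- ===== PORT B =====
-- Source B's per-line scanner: the index-advancing whitespace loop is List.dropWhile, the four
-- indexed character tests are the match on four cons cells, `any` stays `any`.
def pvCheckLineChars (cs : List Char) : Bool :=
  match cs.dropWhile PySem.Chars.isspace with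
  | a :: b :: c :: d :: rest =>
      (a == '[' && b == 'S' && ('1' ≤ c && c ≤ '4') && d == ']')
        && rest.any (fun ch => !PySem.Chars.isspace ch)
  | _ => false

def check_dialogue_text_alt (text_list : List String) : Bool :=
  match text_list with
  | [] => false
  | _ => text_list.all (fun line => pvCheckLineChars line.toList)

-- ===== PRECONDITION & SPEC =====
def Spec_check_dialogue_text (text_list : List String) (out : Bool) : Prop := out = check_dialogue_text_alt text_list
instance (text_list : List String) (out : Bool) : Decidable (Spec_check_dialogue_text text_list out) := by unfold Spec_check_dialogue_text; infer_instance

-- ===== CLAIM (what is proved, stated in full; the proofs are below) =====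
def Claim_equal_check_dialogue_text : Prop := ∀ (text_list : List String), Dom_check_dialogue_text text_list → Spec_check_dialogue_text text_list (check_dialogue_text text_list)

-- ===== LEMMAS AND PROOFS =====

def pvTags : List (List Char) := ["[S1]".toList, "[S2]".toList, "[S3]".toList, "[S4]".toList]

-- startswith by a length-4 prefix is equality of the first 4 characters
theorem startswith_eq_take4 (t p : List Char) (hp : p.length = 4) :
    PySem.Chars.startswith t p = (t.take 4 == p) := by
  rw [Bool.eq_iff_iff, PySem.Chars.startswith_iff, List.prefix_iff_eq_take, beq_iff_eq, hp]
  exact eq_comm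

-- A's single-tag check, rewritten as "first 4 chars equal the tag, and the rest strips non-empty"
theorem monologue_eq (text : String) (p : String) (hp : p.toList.length = 4) :
    check_monologue_text text (some p)
      = (((PySem.Chars.strip text.toList).take 4 == p.toList)
          && !(PySem.Chars.strip ((PySem.Chars.strip text.toList).drop 4) == []))  := by
  unfold check_monologue_text pyRemoveprefix
  simp only [Option.isSome_some, Option.getD_some, Bool.true_and, startswith_eq_take4 _ _ hp,
    if_true, hp]
  by_cases h : (PySem.Chars.strip text.toList).take 4 == p.toList
  · have hpre : p.toList.isPrefixOf (PySem.Chars.strip text.toList) := by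
      rw [List.isPrefixOf_iff_prefix, List.prefix_iff_eq_take, hp]
      exact (beq_iff_eq.mp h).symm
    simp [h, hpre]
    by_cases hn : PySem.Chars.strip ((PySem.Chars.strip text.toList).drop 4) = [] <;>
      simp [hn]
  · simp [h]

-- the four-tag OR is membership of the first four stripped characters in the tag list
theorem or4_eq_contains (text : String) :
    (check_monologue_text text (some "[S1]") || check_monologue_text text (some "[S2]")
      || check_monologue_text text (some "[S3]") || check_monologue_text text (some "[S4]"))
      = (pvTags.contains ((PySem.Chars.strip text.toList).take 4)
          && !(PySem.Chars.strip ((PySem.Chars.strip text.toList).drop 4) == []))  := by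
  rw [monologue_eq text "[S1]" (by decide), monologue_eq text "[S2]" (by decide),
      monologue_eq text "[S3]" (by decide), monologue_eq text "[S4]" (by decide)]
  simp only [pvTags, List.contains_cons, List.contains_nil, Bool.or_false]
  cases PySem.Chars.strip ((PySem.Chars.strip text.toList).drop 4) == [] <;>
    cases (PySem.Chars.strip text.toList).take 4 == "[S1]".toList <;>
    cases (PySem.Chars.strip text.toList).take 4 == "[S2]".toList <;>
    cases (PySem.Chars.strip text.toList).take 4 == "[S3]".toList <;>
    cases (PySem.Chars.strip text.toList).take 4 == "[S4]".toList <;> rfl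

-- strip unfolds to rdropWhile of dropWhile
theorem strip_eq_rdrop_drop (l : List Char) :
    PySem.Chars.strip l
      = List.rdropWhile PySem.Chars.isspace (l.dropWhile PySem.Chars.isspace) := rfl

-- a stripped string is empty exactly when everything is whitespace
theorem strip_eq_nil_iff (l : List Char) :
    (PySem.Chars.strip l = []) ↔ ∀ x ∈ l, PySem.Chars.isspace x = true := by
  rw [strip_eq_rdrop_drop, List.rdropWhile_eq_nil_iff]
  constructor
  · intro h x hx
    rw [← List.takeWhile_append_dropWhile (p := PySem.Chars.isspace) (l := l)] at hx
    rcases List.mem_append.mp hx with h1 | h1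
    · exact List.mem_takeWhile_imp h1
    · exact h x h1
  · intro h x hx
    exact h x ((List.dropWhile_sublist _).mem hx)

-- rdropWhile passes over a block whose reversal dropWhile keeps whole
theorem rdropWhile_append' (p : Char → Bool) (l₁ l₂ : List Char)
    (h : List.dropWhile p l₁.reverse = l₁.reverse) :
    List.rdropWhile p (l₁ ++ l₂) = l₁ ++ List.rdropWhile p l₂ := by
  rcases e : List.dropWhile p l₂.reverse with _ | ⟨y, ys⟩ <;>
    simp [List.rdropWhile, List.reverse_append, List.dropWhile_append, e, h]

-- dropping trailing whitespace does not change which characters can occur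
theorem all_rdropWhile_iff (l : List Char) :
    (∀ x ∈ List.rdropWhile PySem.Chars.isspace l, PySem.Chars.isspace x = true)
      ↔ (∀ x ∈ l, PySem.Chars.isspace x = true) := by
  constructor
  · intro h x hx
    rw [← List.rdropWhile_append_rtakeWhile (p := PySem.Chars.isspace) (l := l)] at hx
    rcases List.mem_append.mp hx with h1 | h1
    · exact h x h1
    · exact List.mem_rtakeWhile_imp h1
  · intro h x hx
    exact h x ((List.rdropWhile_prefix _ l).subset hx)

theorem pvTags_eq :
    pvTags = [['[','S','1',']'], ['[','S','2',']'], ['[','S','3',']'], ['[','S','4',']']] := by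
  decide

-- every tag has length 4
theorem tag_len {t : List Char} (ht : t ∈ pvTags) : t.length = 4 := by
  simp only [pvTags, List.mem_cons, List.not_mem_nil, or_false] at ht
  rcases ht with rfl | rfl | rfl | rfl <;> decide

-- a short list's first four characters are never a tag
theorem contains_short_false (v : List Char) (hv : v.length ≤ 3) :
    pvTags.contains (v.take 4) = false := by
  by_contra hc
  rw [Bool.not_eq_false] at hc
  have hm : v.take 4 ∈ pvTags := by simpa using hc
  have h4 := tag_len hm
  simp [List.length_take] at h4
  omega

-- the per-line core: A's membership form equals B's scanner
theorem line_core (l : List Char) :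
    (pvTags.contains ((PySem.Chars.strip l).take 4)
      && !(PySem.Chars.strip ((PySem.Chars.strip l).drop 4) == []))
      = pvCheckLineChars l := by
  unfold pvCheckLineChars
  rw [strip_eq_rdrop_drop]
  generalize l.dropWhile PySem.Chars.isspace = u
  match u with
  | [] =>
    have hlen : (List.rdropWhile PySem.Chars.isspace ([] : List Char)).length ≤ 3 :=
      le_trans (List.IsPrefix.length_le (List.rdropWhile_prefix _ _)) (by simp)
    rw [contains_short_false _ hlen, Bool.false_and]
  | [a] =>
    have hlen : (List.rdropWhile PySem.Chars.isspace [a]).length ≤ 3 :=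
      le_trans (List.IsPrefix.length_le (List.rdropWhile_prefix _ _)) (by simp)
    rw [contains_short_false _ hlen, Bool.false_and]
  | [a, b] =>
    have hlen : (List.rdropWhile PySem.Chars.isspace [a, b]).length ≤ 3 :=
      le_trans (List.IsPrefix.length_le (List.rdropWhile_prefix _ _)) (by simp)
    rw [contains_short_false _ hlen, Bool.false_and]
  | [a, b, c] =>
    have hlen : (List.rdropWhile PySem.Chars.isspace [a, b, c]).length ≤ 3 :=
      le_trans (List.IsPrefix.length_le (List.rdropWhile_prefix _ _)) (by simp)
    rw [contains_short_false _ hlen, Bool.false_and]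
  | a :: b :: c :: d :: rest =>
    change _ = ((a == '[' && b == 'S' && ('1' ≤ c && c ≤ '4') && d == ']')
        && rest.any fun ch => !PySem.Chars.isspace ch)
    by_cases htag : (a == '[' && b == 'S' && ('1' ≤ c && c ≤ '4') && d == ']') = true
    · have ha : a = '[' := by
        have := (Bool.and_eq_true _ _).mp ((Bool.and_eq_true _ _).mp ((Bool.and_eq_true _ _).mp htag).1).1
        exact beq_iff_eq.mp this.1
      have hb : b = 'S' := by
        have := (Bool.and_eq_true _ _).mp ((Bool.and_eq_true _ _).mp ((Bool.and_eq_true _ _).mp htag).1).1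
        exact beq_iff_eq.mp this.2
      have hd : d = ']' := by
        have := (Bool.and_eq_true _ _).mp htag
        exact beq_iff_eq.mp this.2
      have hcd : c = '1' ∨ c = '2' ∨ c = '3' ∨ c = '4' := by
        have hcr := (Bool.and_eq_true _ _).mp (((Bool.and_eq_true _ _).mp ((Bool.and_eq_true _ _).mp htag).1).2)
        have hn1 : 49 ≤ c.toNat := by
          simpa [Char.le_def, UInt32.le_iff_toNat_le] using of_decide_eq_true hcr.1
        have hn2 : c.toNat ≤ 52 := by
          simpa [Char.le_def, UInt32.le_iff_toNat_le] using of_decide_eq_true hcr.2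
        have : c.toNat = 49 ∨ c.toNat = 50 ∨ c.toNat = 51 ∨ c.toNat = 52 := by omega
        rcases this with h | h | h | h
        · exact Or.inl (Char.ext (UInt32.toNat_inj.mp (by simpa using h)))
        · exact Or.inr (Or.inl (Char.ext (UInt32.toNat_inj.mp (by simpa using h))))
        · exact Or.inr (Or.inr (Or.inl (Char.ext (UInt32.toNat_inj.mp (by simpa using h)))))
        · exact Or.inr (Or.inr (Or.inr (Char.ext (UInt32.toNat_inj.mp (by simpa using h)))))
      subst ha hb hd
      have hsplit : List.rdropWhile PySem.Chars.isspace ('[' :: 'S' :: c :: ']' :: rest)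
          = '[' :: 'S' :: c :: ']' :: List.rdropWhile PySem.Chars.isspace rest := by
        have hws : PySem.Chars.isspace ']' = false := by decide
        have h1 : List.dropWhile PySem.Chars.isspace ((['[', 'S', c, ']'] : List Char).reverse)
            = (['[', 'S', c, ']'] : List Char).reverse := by
          simp [hws]
        simpa using rdropWhile_append' PySem.Chars.isspace ['[', 'S', c, ']'] rest h1
      rw [hsplit]
      simp only [List.take_succ_cons, List.take_zero, List.drop_succ_cons, List.drop_zero]
      have hcontag : pvTags.contains (['[', 'S', c, ']'] : List Char) = true := by
        rcases hcd with rfl | rfl | rfl | rfl <;> decide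
      rw [show (('[' :: 'S' :: c :: ']' :: ([] : List Char)) : List Char) = ['[', 'S', c, ']'] from rfl,
          hcontag, htag, Bool.true_and, Bool.true_and]
      rw [Bool.eq_iff_iff]
      simp only [Bool.not_eq_eq_eq_not, Bool.not_true, beq_eq_false_iff_ne, ne_eq,
        List.any_eq_true]
      rw [← ne_eq, Ne, strip_eq_nil_iff, all_rdropWhile_iff]
      push Not
      constructor
      · rintro ⟨x, hx, hxw⟩
        exact ⟨x, hx, by simp [hxw]⟩
      · rintro ⟨x, hx, hxw⟩
        exact ⟨x, hx, by simpa using hxw⟩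
    · -- not a tag: both sides are false
      rw [Bool.eq_false_iff.mpr htag, Bool.false_and]
      have hcon : pvTags.contains
          ((List.rdropWhile PySem.Chars.isspace (a :: b :: c :: d :: rest)).take 4) = false := by
        by_contra hc
        rw [Bool.not_eq_false] at hc
        have hm : (List.rdropWhile PySem.Chars.isspace (a :: b :: c :: d :: rest)).take 4 ∈ pvTags := by
          simpa using hc
        have h4 := tag_len hm
        have hpre : (List.rdropWhile PySem.Chars.isspace (a :: b :: c :: d :: rest)).take 4
            <+: (a :: b :: c :: d :: rest) :=
          (List.take_prefix _ _).trans (List.rdropWhile_prefix _ _)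
        have heq : (List.rdropWhile PySem.Chars.isspace (a :: b :: c :: d :: rest)).take 4
            = [a, b, c, d] := by
          rw [List.prefix_iff_eq_take] at hpre
          rw [hpre, h4]
          simp
        rw [heq] at hm
        apply htag
        rw [pvTags_eq] at hm
        simp only [List.mem_cons, List.not_mem_nil, or_false] at hm
        rcases hm with hm | hm | hm | hm <;>
          · injection hm with e1 hm; injection hm with e2 hm; injection hm with e3 hm
            injection hm with e4 hm
            subst e1 e2 e3 e4
            decide
      rw [hcon, Bool.false_and]

-- ===== VERDICT (by name: the statement is the Claim_ definition above) =====
theorem check_dialogue_text_spec : Claim_equal_check_dialogue_text := by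
  intro text_list _
  unfold Spec_check_dialogue_text check_dialogue_text check_dialogue_text_alt
  cases text_list with
  | nil => rfl
  | cons x xs =>
    simp only [List.length_cons, Nat.succ_ne_zero, if_false]
    exact List.all_congr rfl (fun line => by rw [or4_eq_contains, line_core])
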